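-- pv_equiv track=rewrite | github.com/c41-gg/Pantasa | rules/hngram_counter.py | tag_type
-- ===== SOURCE A (Python) =====
-- hierarchical_pos_tags = {
--     "NN.*": ["NNC", "NNP", "NNPA", "NNCA"],
--     "PR.*": ["PRS", "PRP", "PRSP", "PRO", "PRQ", "PRQP", "PRL", "PRC", "PRF", "PRI"],
--     "DT.*": ["DTC", "DTCP", "DTP", "DTPP"],
--     "CC.*": ["CCT", "CCR", "CCB", "CCA", "CCP", "CCU"],
--     "LM": [],
--     "TS": [],
--     "VB.*": ["VBW", "VBS", "VBH", "VBN", "VBTS", "VBTR", "VBTF", "VBTP", "VBAF", "VBOF", "VBOB", "VBOL", "VBOI", "VBRF"],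
--     "JJ.*": ["JJD", "JJC", "JJCC", "JJCS", "JJCN", "JJN"],
--     "RB.*": ["RBD", "RBN", "RBK", "RBP", "RBB", "RBR", "RBQ", "RBT", "RBF", "RBW", "RBM", "RBL", "RBI", "RBJ", "RBS"],
--     "CD.*": ["CDB"],
--     "FW": [],
--     "PM.*": ["PMP", "PME", "PMQ", "PMC", "PMSC", "PMS"]
-- }
--
-- def tag_type(tag):
--     # Check if the tag is a combined rough POS tag (i.e., "NN.*_VB.*")
--     if "_" in tag:
--         components = tag.split("_")
--         # Check if all components are rough POS tags
--         if all(component in hierarchical_pos_tags for component in components):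
--             return "rough POS tag"
--         # Check if all components are detailed POS tags
--         elif all(any(component in detailed_tags for detailed_tags in hierarchical_pos_tags.values()) for component in components):
--             return "detailed POS tag"
--
--     # Check if the tag is a rough POS tag
--     if tag in hierarchical_pos_tags:
--         return "rough POS tag"
--
--     # Check if the tag is a detailed POS tag (found in the values of the dictionary)
--     for rough_tag, detailed_tags in hierarchical_pos_tags.items():
--         if tag in detailed_tags:
--             return "detailed POS tag"
-- ===== SOURCE B (Python) =====
-- hierarchical_pos_tags = {
--     "NN.*": ["NNC", "NNP", "NNPA", "NNCA"],
--     "PR.*": ["PRS", "PRP", "PRSP", "PRO", "PRQ", "PRQP", "PRL", "PRC", "PRF", "PRI"],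
--     "DT.*": ["DTC", "DTCP", "DTP", "DTPP"],
--     "CC.*": ["CCT", "CCR", "CCB", "CCA", "CCP", "CCU"],
--     "LM": [],
--     "TS": [],
--     "VB.*": ["VBW", "VBS", "VBH", "VBN", "VBTS", "VBTR", "VBTF", "VBTP", "VBAF", "VBOF", "VBOB", "VBOL", "VBOI", "VBRF"],
--     "JJ.*": ["JJD", "JJC", "JJCC", "JJCS", "JJCN", "JJN"],
--     "RB.*": ["RBD", "RBN", "RBK", "RBP", "RBB", "RBR", "RBQ", "RBT", "RBF", "RBW", "RBM", "RBL", "RBI", "RBJ", "RBS"],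
--     "CD.*": ["CDB"],
--     "FW": [],
--     "PM.*": ["PMP", "PME", "PMQ", "PMC", "PMSC", "PMS"]
-- }
--
-- # Flat index built once: every rough key and every detailed tag mapped to its kind.
-- # Keys and detailed tags are disjoint, so a single lookup replaces A's staged scans.
-- FLAT = dict(
--     [(k, "rough POS tag") for k in hierarchical_pos_tags]
--     + [(d, "detailed POS tag") for vals in hierarchical_pos_tags.values() for d in vals]
-- )
--
-- def tag_type(tag):
--     if "_" not in tag:
--         return FLAT.get(tag)
--     # combined tag: one lookup per component; answer is the class iff it is uniform
--     kinds = {FLAT.get(c) for c in tag.split("_")}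
--     return kinds.pop() if len(kinds) == 1 else None
-- ===== Notes on version B (the rewrite author's own statement) =====
-- stated objective: alternative
-- what changed: Replaced A's staged all()/any() membership passes and final dict-items scan by a flat tag->kind dictionary built once (keys->rough, detailed tags->detailed), so tag_type does one lookup per component and decides a combined tag by checking that the set of looked-up kinds is uniform.
import Mathlib
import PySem

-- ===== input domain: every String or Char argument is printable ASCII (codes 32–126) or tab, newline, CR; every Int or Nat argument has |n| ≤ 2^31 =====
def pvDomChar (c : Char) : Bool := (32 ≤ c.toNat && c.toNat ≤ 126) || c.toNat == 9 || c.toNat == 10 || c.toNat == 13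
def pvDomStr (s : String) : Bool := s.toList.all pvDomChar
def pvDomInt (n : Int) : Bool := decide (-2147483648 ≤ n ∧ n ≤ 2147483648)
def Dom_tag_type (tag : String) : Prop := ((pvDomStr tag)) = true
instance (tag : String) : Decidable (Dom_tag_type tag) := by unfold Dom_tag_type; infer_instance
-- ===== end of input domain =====

-- B replaces A's staged all()/any() passes and final dict scan by a flat tag→kind index
-- built once, one lookup per component, and a set-uniformity check (objective: alternative).


def hierarchical_pos_tags : List (String × List String) := [
  ("NN.*", ["NNC", "NNP", "NNPA", "NNCA"]),
  ("PR.*", ["PRS", "PRP", "PRSP", "PRO", "PRQ", "PRQP", "PRL", "PRC", "PRF", "PRI"]),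
  ("DT.*", ["DTC", "DTCP", "DTP", "DTPP"]),
  ("CC.*", ["CCT", "CCR", "CCB", "CCA", "CCP", "CCU"]),
  ("LM", []),
  ("TS", []),
  ("VB.*", ["VBW", "VBS", "VBH", "VBN", "VBTS", "VBTR", "VBTF", "VBTP", "VBAF", "VBOF", "VBOB", "VBOL", "VBOI", "VBRF"]),
  ("JJ.*", ["JJD", "JJC", "JJCC", "JJCS", "JJCN", "JJN"]),
  ("RB.*", ["RBD", "RBN", "RBK", "RBP", "RBB", "RBR", "RBQ", "RBT", "RBF", "RBW", "RBM", "RBL", "RBI", "RBJ", "RBS"]),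
  ("CD.*", ["CDB"]),
  ("FW", []),
  ("PM.*", ["PMP", "PME", "PMQ", "PMC", "PMSC", "PMS"])]

-- ===== PORT A =====
-- A's final for-loop over dict.items(), returning "detailed POS tag" at the first value list containing tag
def tagTypeLoop (items : List (String × List String)) (tag : String) : Option String :=
  match items with
  | [] => none
  | (_, detailed) :: rest =>
    if detailed.contains tag then some "detailed POS tag" else tagTypeLoop rest tag

def tag_type (tag : String) : Option String :=
  -- the combined branch's two early returns, 'none' = fall through
  let combined : Option String :=
    if PySem.Str.isIn "_" tag then
      let components := (PySem.Str.split? tag "_").getD []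
      if components.all (fun c => (hierarchical_pos_tags.map Prod.fst).contains c) then
        some "rough POS tag"
      else if components.all
          (fun c => (hierarchical_pos_tags.map Prod.snd).any (fun detailed => detailed.contains c)) then
        some "detailed POS tag"
      else none
    else none
  match combined with
  | some r => some r
  | none =>
    if (hierarchical_pos_tags.map Prod.fst).contains tag then some "rough POS tag"
    else tagTypeLoop hierarchical_pos_tags tag

-- ===== PORT B =====
-- FLAT: the flat index built once from the two comprehensions (keys → rough, detailed tags → detailed);
-- dict(pairs) over these (distinct) keys is PySem.Dict.ofList of the concatenated pair list
def flatPairs : List (String × String) :=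
  (hierarchical_pos_tags.map (fun p => (p.1, "rough POS tag"))) ++
  (hierarchical_pos_tags.flatMap (fun p => p.2.map (fun d => (d, "detailed POS tag"))))

def flatIndex : PySem.Dict String String := PySem.Dict.ofList flatPairs

def tag_type_alt (tag : String) : Option String :=
  if !(PySem.Str.isIn "_" tag) then
    flatIndex.get? tag
  else
    let kinds : PySem.Set (Option String) :=
      PySem.Set.ofList (((PySem.Str.split? tag "_").getD []).map (fun c => flatIndex.get? c))
    -- kinds.pop() on a one-element set is its unique element (order-independent)
    if kinds.length = 1 then kinds.getD 0 none else none

-- ===== PRECONDITION & SPEC =====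
def Spec_tag_type (tag : String) (out : Option String) : Prop := out = tag_type_alt tag
instance (tag : String) (out : Option String) : Decidable (Spec_tag_type tag out) := by unfold Spec_tag_type; infer_instance

-- ===== CLAIM (what is proved, stated in full; the proofs are below) =====
def Claim_equal_tag_type : Prop := ∀ (tag : String), Dom_tag_type tag → Spec_tag_type tag (tag_type tag)

-- ===== LEMMAS AND PROOFS =====

-- the value a flat-index lookup yields, phrased over the original table
def FSpec (c : String) : Option String :=
  if (hierarchical_pos_tags.map Prod.fst).contains c then some "rough POS tag"
  else if hierarchical_pos_tags.any (fun p => p.2.contains c) then some "detailed POS tag"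
  else none

-- keys of the table never occur in any value list
theorem key_not_in_vals : ∀ c ∈ hierarchical_pos_tags.map Prod.fst,
    hierarchical_pos_tags.any (fun p => p.2.contains c) = false := by decide

-- keys contain no underscore
theorem key_no_underscore : ∀ c ∈ hierarchical_pos_tags.map Prod.fst,
    PySem.Str.isIn "_" c = false := by decide

-- values contain no underscore
theorem val_no_underscore : ∀ p ∈ hierarchical_pos_tags, ∀ c ∈ p.2,
    PySem.Str.isIn "_" c = false := by decide

-- Python's s.split(sep) never returns an empty list
theorem splitGo_ne_nil (sep : List Char) (fuel : Nat) (l cur : List Char) (acc : List (List Char)) :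
    PySem.Chars.splitOn.go sep fuel l cur acc ≠ [] := by
  induction fuel generalizing l cur acc with
  | zero => simp [PySem.Chars.splitOn.go]
  | succ n ih =>
    cases l with
    | nil => simp [PySem.Chars.splitOn.go]
    | cons c rest =>
      rw [PySem.Chars.splitOn.go]
      split
      · exact ih _ _ _
      · exact ih _ _ _

theorem split_ne_nil (s : String) : (PySem.Str.split? s "_").getD [] ≠ [] := by
  simp [PySem.Str.split?, PySem.Chars.split?, PySem.Chars.splitOn]
  intro h
  exact splitGo_ne_nil _ _ _ _ _ h

-- find? over a constant-valued pair map is the membership test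
theorem find?_pair_map (xs : List String) (v c : String) :
    List.find? (fun p => p.1 == c) (xs.map (fun d => (d, v))) =
      if xs.contains c then some (c, v) else none := by
  induction xs with
  | nil => rfl
  | cons d t ih =>
    by_cases h : d = c
    · subst h; simp
    · have hb : (d == c) = false := by simpa using h
      have hcd : (c = d ∨ c ∈ t) ↔ (c ∈ t) := or_iff_right (fun hcd => h hcd.symm)
      simp [hb, ih, hcd]

-- find? over the flattened value lists is A's any-scan
theorem find?_flat_vals (items : List (String × List String)) (c : String) :
    List.find? (fun p => p.1 == c)
        (items.flatMap (fun p => p.2.map (fun d => (d, "detailed POS tag")))) =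
      if items.any (fun p => p.2.contains c) then some (c, "detailed POS tag") else none := by
  induction items with
  | nil => rfl
  | cons hd tl ih =>
    rw [List.flatMap_cons, List.find?_append, find?_pair_map, ih, List.any_cons]
    by_cases h : hd.2.contains c = true
    · rw [h, Bool.true_or]
      simp
    · have h' : hd.2.contains c = false := by simpa using h
      rw [h', Bool.false_or]
      simp

-- the flat lookup, characterised over the original table
set_option maxRecDepth 40000 in
theorem flat_get (c : String) : flatIndex.get? c = FSpec c := by
  have hitems : flatIndex.items = flatPairs := by decide
  rw [PySem.Dict.get?, hitems]
  unfold flatPairs FSpec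
  rw [List.find?_append]
  have hkeys : hierarchical_pos_tags.map (fun p => (p.1, "rough POS tag")) =
      (hierarchical_pos_tags.map Prod.fst).map (fun k => (k, "rough POS tag")) := by
    simp [List.map_map]
  rw [hkeys, find?_pair_map, find?_flat_vals]
  split_ifs <;> rfl

theorem FSpec_eq_rough_iff (c : String) :
    FSpec c = some "rough POS tag" ↔ (hierarchical_pos_tags.map Prod.fst).contains c = true := by
  unfold FSpec
  by_cases h1 : (hierarchical_pos_tags.map Prod.fst).contains c = true
  · rw [if_pos h1]; exact iff_of_true rfl h1
  · rw [if_neg h1]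
    split_ifs with h2
    · exact iff_of_false (by decide) h1
    · exact iff_of_false (by simp) h1

theorem FSpec_eq_detailed_iff (c : String) :
    FSpec c = some "detailed POS tag" ↔
      hierarchical_pos_tags.any (fun p => p.2.contains c) = true := by
  unfold FSpec
  by_cases h1 : (hierarchical_pos_tags.map Prod.fst).contains c = true
  · rw [if_pos h1]
    refine iff_of_false (by decide) (fun h2 => ?_)
    rw [key_not_in_vals c (by simpa using h1)] at h2
    exact Bool.false_ne_true h2
  · rw [if_neg h1]
    split_ifs with h2
    · exact iff_of_true rfl h2
    · exact iff_of_false (by simp) h2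

-- set(xs) of a nonempty constant list is the singleton
theorem foldl_add_const {α : Type} [BEq α] [LawfulBEq α] (x : α) (t : List α)
    (h : ∀ y ∈ t, y = x) : t.foldl PySem.Set.add [x] = [x] := by
  induction t with
  | nil => rfl
  | cons y t ih =>
    have hy : y = x := h y (List.mem_cons_self)
    rw [List.foldl_cons, hy, PySem.Set.add_of_mem (List.mem_singleton.2 rfl)]
    exact ih fun z hz => h z (List.mem_cons_of_mem _ hz)

theorem ofList_const {α : Type} [BEq α] [LawfulBEq α] (x : α) (cs : List α)
    (hne : cs ≠ []) (hall : ∀ y ∈ cs, y = x) : PySem.Set.ofList cs = [x] := by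
  cases cs with
  | nil => exact absurd rfl hne
  | cons y t =>
    have hy : y = x := hall y (List.mem_cons_self)
    rw [PySem.Set.ofList_eq_foldl, List.foldl_cons, hy]
    have : PySem.Set.add ([] : PySem.Set α) x = [x] := by
      rw [PySem.Set.add_of_not_mem (List.not_mem_nil)]; rfl
    rw [this]
    exact foldl_add_const x t fun z hz => hall z (List.mem_cons_of_mem _ hz)

-- ===== VERDICT (by name: the statement is the Claim_ definition above) =====
theorem tag_type_spec : Claim_equal_tag_type := by
  intro tag _
  unfold Spec_tag_type
  simp only [tag_type, tag_type_alt]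
  by_cases hu : PySem.Str.isIn "_" tag = true
  · simp only [hu, Bool.not_true, Bool.false_eq_true, if_false]
    have hne : (PySem.Str.split? tag "_").getD [] ≠ [] := split_ne_nil tag
    have hmapF : ((PySem.Str.split? tag "_").getD []).map (fun c => flatIndex.get? c) =
        ((PySem.Str.split? tag "_").getD []).map FSpec :=
      List.map_congr_left fun c _ => flat_get c
    rw [hmapF]
    set comps := (PySem.Str.split? tag "_").getD [] with hc
    have hneF : comps.map FSpec ≠ [] := by simpa using hne
    by_cases hAllK : comps.all (fun c => (hierarchical_pos_tags.map Prod.fst).contains c) = true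
    · -- all components rough: both return "rough POS tag"
      have hset : PySem.Set.ofList (comps.map FSpec) = [some "rough POS tag"] :=
        ofList_const _ _ hneF (by
          intro y hy
          obtain ⟨c, hcm, rfl⟩ := List.mem_map.1 hy
          exact (FSpec_eq_rough_iff c).2 (List.all_eq_true.1 hAllK c hcm))
      rw [if_pos hAllK, hset]
      simp
    · by_cases hAllV : comps.all
          (fun c => (hierarchical_pos_tags.map Prod.snd).any (fun detailed => detailed.contains c)) = true
      · -- all components detailed: both return "detailed POS tag"
        have hset : PySem.Set.ofList (comps.map FSpec) = [some "detailed POS tag"] :=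
          ofList_const _ _ hneF (by
            intro y hy
            obtain ⟨c, hcm, rfl⟩ := List.mem_map.1 hy
            exact (FSpec_eq_detailed_iff c).2 (by
              have := List.all_eq_true.1 hAllV c hcm
              simpa [List.any_map] using this))
        rw [if_neg hAllK, if_pos hAllV, hset]
        simp
      · -- mixed components: A falls through to 'none' (tag itself contains '_', so it is in neither table)
        have hK : ¬ ((hierarchical_pos_tags.map Prod.fst).contains tag = true) := fun h => by
          rw [key_no_underscore tag (by simpa using h)] at hu
          exact Bool.false_ne_true hu
        have hV : ∀ p ∈ hierarchical_pos_tags, p.2.contains tag = false := fun p hp => by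
          by_contra h
          rw [val_no_underscore p hp tag (by simpa using h)] at hu
          exact Bool.false_ne_true hu
        have hloop : ∀ items, (∀ p ∈ items, p.2.contains tag = false) →
            tagTypeLoop items tag = none := by
          intro items
          induction items with
          | nil => intro _; rfl
          | cons hd tl ih =>
            intro hall
            rw [tagTypeLoop, hall hd List.mem_cons_self]
            simp only [Bool.false_eq_true, if_false]
            exact ih fun p hp => hall p (List.mem_cons_of_mem _ hp)
        rw [if_neg hAllK, if_neg hAllV]
        simp only [if_neg hK, hloop hierarchical_pos_tags hV]
        -- B's side: a uniform class would make one of A's all-checks succeed, so it is 'none' too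
        by_cases h1 : (PySem.Set.ofList (comps.map FSpec)).length = 1
        · obtain ⟨x, hx⟩ := List.length_eq_one_iff.1 h1
          have hallx : ∀ c ∈ comps, FSpec c = x := by
            intro c hcm
            have hmem : FSpec c ∈ PySem.Set.ofList (comps.map FSpec) :=
              (PySem.Set.mem_ofList _ _).2 (List.mem_map_of_mem hcm)
            rw [hx] at hmem
            exact List.mem_singleton.1 hmem
          obtain ⟨c0, hc0⟩ := List.exists_mem_of_ne_nil _ hne
          have hxnone : x = none := by
            have hx0 := hallx c0 hc0
            revert hx0
            unfold FSpec
            split_ifs with g1 g2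
            · intro h0
              exfalso
              apply hAllK
              refine List.all_eq_true.2 fun c hcm => ?_
              have hcx := hallx c hcm
              rw [← h0] at hcx
              exact (FSpec_eq_rough_iff c).1 hcx
            · intro h0
              exfalso
              apply hAllV
              refine List.all_eq_true.2 fun c hcm => ?_
              have hcx := hallx c hcm
              rw [← h0] at hcx
              have := (FSpec_eq_detailed_iff c).1 hcx
              simpa [List.any_map] using this
            · intro h0; exact h0.symm
          rw [if_pos h1, hx, hxnone]
          rfl
        · rw [if_neg h1]
          simp
  · have hu' : PySem.Str.isIn "_" tag = false := by simpa using hu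
    simp only [hu', Bool.false_eq_true, if_false, Bool.not_false, if_true]
    rw [flat_get]
    unfold FSpec
    by_cases hK : (hierarchical_pos_tags.map Prod.fst).contains tag = true
    · rw [if_pos hK, if_pos hK]
    · rw [if_neg hK, if_neg hK]
      have : ∀ items, tagTypeLoop items tag =
          (if items.any (fun p => p.2.contains tag) then some "detailed POS tag" else none) := by
        intro items
        induction items with
        | nil => rfl
        | cons hd tl ih =>
          simp only [tagTypeLoop, List.any_cons, ih]
          by_cases h : hd.2.contains tag = true
          · rw [if_pos h, if_pos (by rw [h]; simp)]
          · have h' : hd.2.contains tag = false := by simpa using h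
            rw [if_neg h]; simp only [h', Bool.false_or]
      rw [this]
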